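-- pv_equiv track=rewrite | github.com/diego-aquino/competitive-programming | Practicing/possibleSum.py | getSplitSums
-- ===== SOURCE A (Python) =====
-- def getSplitSums(numbers):
--     n = len(numbers)
--
--     splitNumbers = [numbers[:n//2], numbers[n//2:]]
--
--     sums = []
--     for currentList in splitNumbers:
--         currentSums = []
--
--         for i in range(len(currentList)):
--             for j in range(i, len(currentList)):
--                 newSum = sum(currentList[i:j + 1])
--
--                 if newSum not in currentSums:
--                     currentSums.append(newSum)
--
--         currentSums.sort()
--         sums.append(currentSums)
--
--     return sums
-- ===== SOURCE B (Python) =====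
-- def getSplitSums(numbers):
--     n = len(numbers)
--     return [_halfSums(numbers[:n // 2]), _halfSums(numbers[n // 2:])]
--
--
-- def _halfSums(part):
--     prefix = [0]
--     total = 0
--     for x in part:
--         total += x
--         prefix.append(total)
--     m = len(part)
--     sums = set()
--     for i in range(m):
--         for j in range(i, m):
--             sums.add(prefix[j + 1] - prefix[i])
--     return sorted(sums)
-- ===== Notes on version B (the rewrite author's own statement) =====
-- stated objective: faster
-- what changed: B precomputes prefix sums so each range sum is O(1) and deduplicates with a set instead of re-summing every slice and linearly scanning a list for membership, then sorts once.
import Mathlib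
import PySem

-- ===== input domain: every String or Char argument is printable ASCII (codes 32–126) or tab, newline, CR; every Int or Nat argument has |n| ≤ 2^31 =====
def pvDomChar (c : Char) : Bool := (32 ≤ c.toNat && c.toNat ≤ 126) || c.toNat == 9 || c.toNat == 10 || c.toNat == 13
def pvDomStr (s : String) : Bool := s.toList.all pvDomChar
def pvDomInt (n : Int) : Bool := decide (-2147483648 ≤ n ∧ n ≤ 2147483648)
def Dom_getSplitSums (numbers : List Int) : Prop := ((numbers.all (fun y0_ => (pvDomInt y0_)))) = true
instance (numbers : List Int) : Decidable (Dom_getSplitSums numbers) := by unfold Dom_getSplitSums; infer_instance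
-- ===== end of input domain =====

-- B replaces A's per-slice re-summation and linear membership scans by prefix sums plus a set, then one sort (faster).

-- ===== PORT A =====
def getSplitSums (numbers : List Int) : List (List Int) :=
  let n : Int := numbers.length
  let splitNumbers : List (List Int) :=
    [PySem.List.slice numbers none (some (PySem.Int.floordiv n 2)),
     PySem.List.slice numbers (some (PySem.Int.floordiv n 2)) none]
  splitNumbers.foldl (fun sums currentList =>
    let currentSums : List Int :=
      (PySem.List.pyRange 0 (currentList.length : Int)).foldl (fun acc i =>
        (PySem.List.pyRange i (currentList.length : Int)).foldl (fun acc j =>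
          let newSum := (PySem.List.slice currentList (some i) (some (j + 1))).sum
          if acc.contains newSum then acc else acc ++ [newSum]) acc) []
    sums ++ [PySem.List.sorted currentSums (fun x => x)]) []

-- ===== PORT B =====
def pvHalfSums (part : List Int) : List Int :=
  let pfx : List Int :=
    (part.foldl (fun (st : List Int × Int) x => (st.1 ++ [st.2 + x], st.2 + x)) ([0], 0)).1
  let m : Int := part.length
  let sums : PySem.Set Int :=
    (PySem.List.pyRange 0 m).foldl (fun s i =>
      (PySem.List.pyRange i m).foldl (fun s j =>
        PySem.Set.add s
          (PySem.List.pyGetD pfx (j + 1) 0 - PySem.List.pyGetD pfx i 0)) s)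
      PySem.Set.empty
  PySem.List.sorted sums (fun x => x)

def getSplitSums_alt (numbers : List Int) : List (List Int) :=
  let n : Int := numbers.length
  [pvHalfSums (PySem.List.slice numbers none (some (PySem.Int.floordiv n 2))),
   pvHalfSums (PySem.List.slice numbers (some (PySem.Int.floordiv n 2)) none)]

-- ===== PRECONDITION & SPEC =====
def Spec_getSplitSums (numbers : List Int) (out : List (List Int)) : Prop := out = getSplitSums_alt numbers
instance (numbers : List Int) (out : List (List Int)) : Decidable (Spec_getSplitSums numbers out) := by unfold Spec_getSplitSums; infer_instance

-- ===== CLAIM (what is proved, stated in full; the proofs are below) =====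
def Claim_equal_getSplitSums : Prop := ∀ (numbers : List Int), Dom_getSplitSums numbers → Spec_getSplitSums numbers (getSplitSums numbers)

-- ===== LEMMAS AND PROOFS =====

-- the prefix-building fold of B, characterised
theorem pvPrefix_fold (part : List Int) (acc : List Int) (t : Int) :
    (part.foldl (fun (st : List Int × Int) x => (st.1 ++ [st.2 + x], st.2 + x)) (acc, t)).1
      = acc ++ (List.range part.length).map (fun k => t + (part.take (k + 1)).sum) := by
  induction part generalizing acc t with
  | nil => simp
  | cons x xs ih =>
      simp only [List.foldl_cons, ih, List.length_cons, List.range_succ_eq_map,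
        List.map_cons, List.map_map]
      simp [List.append_assoc, Function.comp, add_assoc]

theorem pvPrefix_eq (part : List Int) :
    (part.foldl (fun (st : List Int × Int) x => (st.1 ++ [st.2 + x], st.2 + x)) (([0], 0) : List Int × Int)).1
      = (List.range (part.length + 1)).map (fun k => (part.take k).sum) := by
  rw [pvPrefix_fold, List.range_succ_eq_map, List.map_cons, List.map_map]
  simp [Function.comp]

theorem pvPrefix_getD (part : List Int) (k : Nat) (hk : k ≤ part.length) :
    PySem.List.pyGetD
      ((part.foldl (fun (st : List Int × Int) x => (st.1 ++ [st.2 + x], st.2 + x)) (([0], 0) : List Int × Int)).1)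
      (k : Int) 0 = (part.take k).sum := by
  rw [pvPrefix_eq, PySem.List.pyGetD_natCast, PySem.List.getD_map_range _ _ _ _ (by omega)]

theorem pvSum_take_drop (xs : List Int) (a b : Nat) (hab : a ≤ b) :
    ((xs.drop a).take (b - a)).sum = (xs.take b).sum - (xs.take a).sum := by
  have h : xs.take b = xs.take a ++ (xs.drop a).take (b - a) := by
    rw [← List.take_add]
    congr 1
    omega
  rw [h, List.sum_append]
  ring

theorem pvSliceSum (part : List Int) (i j : Int) (hi : 0 ≤ i) (hij : i ≤ j)
    (hj : j < (part.length : Int)) :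
    (PySem.List.slice part (some i) (some (j + 1))).sum
      = PySem.List.pyGetD
          ((part.foldl (fun (st : List Int × Int) x => (st.1 ++ [st.2 + x], st.2 + x)) (([0], 0) : List Int × Int)).1)
          (j + 1) 0
        - PySem.List.pyGetD
          ((part.foldl (fun (st : List Int × Int) x => (st.1 ++ [st.2 + x], st.2 + x)) (([0], 0) : List Int × Int)).1)
          i 0 := by
  have hi' : i = ((i.toNat : Nat) : Int) := by omega
  have hj' : j + 1 = (((j.toNat + 1 : Nat)) : Int) := by omega
  rw [hi', hj', PySem.List.slice_natCast,
    pvPrefix_getD part (j.toNat + 1) (by omega), pvPrefix_getD part i.toNat (by omega),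
    ← pvSum_take_drop part i.toNat (j.toNat + 1) (by omega)]

-- the two nested loops agree: same iteration space, same added value, same dedup step
theorem pvHalf_eq (part : List Int) :
    PySem.List.sorted ((PySem.List.pyRange 0 (part.length : Int)).foldl (fun acc i =>
        (PySem.List.pyRange i (part.length : Int)).foldl (fun acc j =>
          let newSum := (PySem.List.slice part (some i) (some (j + 1))).sum
          if acc.contains newSum then acc else acc ++ [newSum]) acc) ([] : List Int)) (fun x => x)
      = pvHalfSums part := by
  simp only [pvHalfSums]
  congr 1
  apply PySem.List.foldl_congr_mem
  intro acc i hi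
  rw [PySem.List.mem_pyRange_one] at hi
  apply PySem.List.foldl_congr_mem
  intro acc2 j hj
  rw [PySem.List.mem_pyRange_one] at hj
  simp only [PySem.Set.add, PySem.Set.contains]
  rw [pvSliceSum part i j hi.1 hj.1 hj.2]
  rfl

-- ===== VERDICT (by name: the statement is the Claim_ definition above) =====
theorem getSplitSums_spec : Claim_equal_getSplitSums := by
  intro numbers _
  show getSplitSums numbers = getSplitSums_alt numbers
  simp only [getSplitSums, getSplitSums_alt, List.foldl_cons, List.foldl_nil,
    List.nil_append]
  rw [pvHalf_eq, pvHalf_eq]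
  rfl
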